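-- pv_equiv track=rewrite | github.com/Pierre-Mike/pi-captain | skills/json-canvas/scripts/generate-canvas.py | compute_group_bounds
-- ===== SOURCE A (Python) =====
-- def compute_group_bounds(group_idx, nodes, positions, sizes, padding=20, label_offset=30):
--     """Compute group bounds from its children's positions and sizes."""
--     children = [i for i, n in enumerate(nodes) if n.get("group") == group_idx]
--     if not children:
--         return positions[group_idx][0], positions[group_idx][1], sizes[group_idx][0], sizes[group_idx][1]
--
--     min_x = min(positions[i][0] for i in children)
--     min_y = min(positions[i][1] for i in children)
--     max_x = max(positions[i][0] + sizes[i][0] for i in children)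
--     max_y = max(positions[i][1] + sizes[i][1] for i in children)
--
--     gx = min_x - padding
--     gy = min_y - label_offset
--     gw = (max_x - min_x) + 2 * padding
--     gh = (max_y - min_y) + padding + label_offset
--
--     return gx, gy, gw, gh
-- ===== SOURCE B (Python) =====
-- def compute_group_bounds(group_idx, nodes, positions, sizes, padding=20, label_offset=30):
--     """Compute group bounds from its children's positions and sizes (single fused pass)."""
--     bounds = None
--     for i, n in enumerate(nodes):
--         if n.get("group") == group_idx:
--             x, y = positions[i][0], positions[i][1]
--             w, h = sizes[i][0], sizes[i][1]
--             if bounds is None: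
--                 bounds = (x, y, x + w, y + h)
--             else:
--                 a, b, c, d = bounds
--                 bounds = (min(a, x), min(b, y), max(c, x + w), max(d, y + h))
--     if bounds is None:
--         return positions[group_idx][0], positions[group_idx][1], sizes[group_idx][0], sizes[group_idx][1]
--     a, b, c, d = bounds
--     return a - padding, b - label_offset, (c - a) + 2 * padding, (d - b) + padding + label_offset
-- ===== Notes on version B (the rewrite author's own statement) =====
-- stated objective: simpler
-- what changed: Replaces the materialized children index list plus four separate min/max generator scans with one fused pass over enumerate(nodes) that updates running (min_x, min_y, max_x, max_y) in an Optional accumulator.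
import Mathlib
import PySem

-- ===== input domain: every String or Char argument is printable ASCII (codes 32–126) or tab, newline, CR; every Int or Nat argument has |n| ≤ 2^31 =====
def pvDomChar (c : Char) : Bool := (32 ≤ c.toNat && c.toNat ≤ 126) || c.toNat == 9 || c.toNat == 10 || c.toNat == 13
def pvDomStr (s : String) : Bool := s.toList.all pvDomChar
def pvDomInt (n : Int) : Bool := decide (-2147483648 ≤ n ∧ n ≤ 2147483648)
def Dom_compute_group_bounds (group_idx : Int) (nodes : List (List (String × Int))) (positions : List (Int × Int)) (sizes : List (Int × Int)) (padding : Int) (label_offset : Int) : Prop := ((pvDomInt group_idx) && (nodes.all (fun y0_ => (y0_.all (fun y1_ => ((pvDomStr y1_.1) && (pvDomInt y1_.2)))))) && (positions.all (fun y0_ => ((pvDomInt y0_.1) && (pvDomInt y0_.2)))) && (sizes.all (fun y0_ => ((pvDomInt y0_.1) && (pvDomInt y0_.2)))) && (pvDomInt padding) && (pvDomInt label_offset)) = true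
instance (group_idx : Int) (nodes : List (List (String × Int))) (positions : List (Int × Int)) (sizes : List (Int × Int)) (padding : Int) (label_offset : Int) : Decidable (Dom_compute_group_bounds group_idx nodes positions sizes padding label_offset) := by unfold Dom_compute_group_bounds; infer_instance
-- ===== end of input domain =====

-- B replaces A's children index list + four separate min/max scans by one fused pass
-- over enumerate(nodes) with a running-bounds accumulator (objective: simpler).

-- ===== PORT A =====
-- A: build the children index list, then four separate min/max passes over it.
def compute_group_bounds (group_idx : Int) (nodes : List (List (String × Int))) (positions : List (Int × Int)) (sizes : List (Int × Int)) (padding : Int) (label_offset : Int) : Int × Int × Int × Int :=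
  let children := ((PySem.List.enumerate nodes 0).filter (fun q => q.2.lookup "group" == some group_idx)).map (·.1)
  if children.isEmpty then
    ((PySem.List.pyGetD positions group_idx (0, 0)).1, (PySem.List.pyGetD positions group_idx (0, 0)).2,
     (PySem.List.pyGetD sizes group_idx (0, 0)).1, (PySem.List.pyGetD sizes group_idx (0, 0)).2)
  else
    let min_x := (PySem.List.min? (children.map (fun i => (PySem.List.pyGetD positions i (0, 0)).1)) (fun v => v)).getD 0
    let min_y := (PySem.List.min? (children.map (fun i => (PySem.List.pyGetD positions i (0, 0)).2)) (fun v => v)).getD 0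
    let max_x := (PySem.List.max? (children.map (fun i => (PySem.List.pyGetD positions i (0, 0)).1 + (PySem.List.pyGetD sizes i (0, 0)).1)) (fun v => v)).getD 0
    let max_y := (PySem.List.max? (children.map (fun i => (PySem.List.pyGetD positions i (0, 0)).2 + (PySem.List.pyGetD sizes i (0, 0)).2)) (fun v => v)).getD 0
    (min_x - padding, min_y - label_offset, (max_x - min_x) + 2 * padding, (max_y - min_y) + padding + label_offset)

-- ===== PORT B =====
-- B: one fused fold over enumerate(nodes) maintaining Optional running bounds.
def cgbStep (group_idx : Int) (positions : List (Int × Int)) (sizes : List (Int × Int)) (acc : Option (Int × Int × Int × Int)) (q : Int × List (String × Int)) : Option (Int × Int × Int × Int) :=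
  if q.2.lookup "group" == some group_idx then
    let x := (PySem.List.pyGetD positions q.1 (0, 0)).1
    let y := (PySem.List.pyGetD positions q.1 (0, 0)).2
    let w := (PySem.List.pyGetD sizes q.1 (0, 0)).1
    let h := (PySem.List.pyGetD sizes q.1 (0, 0)).2
    match acc with
    | none => some (x, y, x + w, y + h)
    | some (a, b, c, d) => some (min a x, min b y, max c (x + w), max d (y + h))
  else acc

def compute_group_bounds_alt (group_idx : Int) (nodes : List (List (String × Int))) (positions : List (Int × Int)) (sizes : List (Int × Int)) (padding : Int) (label_offset : Int) : Int × Int × Int × Int :=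
  match (PySem.List.enumerate nodes 0).foldl (cgbStep group_idx positions sizes) none with
  | none =>
    ((PySem.List.pyGetD positions group_idx (0, 0)).1, (PySem.List.pyGetD positions group_idx (0, 0)).2,
     (PySem.List.pyGetD sizes group_idx (0, 0)).1, (PySem.List.pyGetD sizes group_idx (0, 0)).2)
  | some (a, b, c, d) =>
    (a - padding, b - label_offset, (c - a) + 2 * padding, (d - b) + padding + label_offset)

-- ===== PRECONDITION & SPEC =====
-- Pre_ excludes exactly the inputs where the Python A raises IndexError: a child's index
-- beyond positions/sizes, or (with no children) group_idx not a valid Python index.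
def Pre_compute_group_bounds (group_idx : Int) (nodes : List (List (String × Int))) (positions : List (Int × Int)) (sizes : List (Int × Int)) (padding : Int) (label_offset : Int) : Prop :=
  (∀ q ∈ PySem.List.enumerate nodes 0, q.2.lookup "group" = some group_idx →
     PySem.Raise.InRange positions.length q.1 ∧ PySem.Raise.InRange sizes.length q.1) ∧
  ((∀ q ∈ PySem.List.enumerate nodes 0, ¬ q.2.lookup "group" = some group_idx) →
     PySem.Raise.InRange positions.length group_idx ∧ PySem.Raise.InRange sizes.length group_idx)
instance (group_idx : Int) (nodes : List (List (String × Int))) (positions : List (Int × Int)) (sizes : List (Int × Int)) (padding : Int) (label_offset : Int) : Decidable (Pre_compute_group_bounds group_idx nodes positions sizes padding label_offset) := by unfold Pre_compute_group_bounds; infer_instance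

def pvWitness_compute_group_bounds : Int × (List (List (String × Int))) × (List (Int × Int)) × (List (Int × Int)) × Int × Int :=
  (0, [[("group", 0)], [("x", 5)]], [(1, 2), (3, 4)], [(10, 20), (30, 40)], 20, 30)

def Spec_compute_group_bounds (group_idx : Int) (nodes : List (List (String × Int))) (positions : List (Int × Int)) (sizes : List (Int × Int)) (padding : Int) (label_offset : Int) (out : Int × Int × Int × Int) : Prop := out = compute_group_bounds_alt group_idx nodes positions sizes padding label_offset
instance (group_idx : Int) (nodes : List (List (String × Int))) (positions : List (Int × Int)) (sizes : List (Int × Int)) (padding : Int) (label_offset : Int) (out : Int × Int × Int × Int) : Decidable (Spec_compute_group_bounds group_idx nodes positions sizes padding label_offset out) := by unfold Spec_compute_group_bounds; infer_instance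

-- ===== CLAIM (what is proved, stated in full; the proofs are below) =====
def Claim_equal_compute_group_bounds : Prop := ∀ (group_idx : Int) (nodes : List (List (String × Int))) (positions : List (Int × Int)) (sizes : List (Int × Int)) (padding : Int) (label_offset : Int), Dom_compute_group_bounds group_idx nodes positions sizes padding label_offset → Pre_compute_group_bounds group_idx nodes positions sizes padding label_offset → Spec_compute_group_bounds group_idx nodes positions sizes padding label_offset (compute_group_bounds group_idx nodes positions sizes padding label_offset)

-- ===== LEMMAS AND PROOFS =====

theorem cgb_foldl_some (gi : Int) (ps ss : List (Int × Int)) (l : List (Int × List (String × Int))) (a b c d : Int) :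
    l.foldl (cgbStep gi ps ss) (some (a, b, c, d)) =
      some (((l.filter (fun q => q.2.lookup "group" == some gi)).map (·.1)).foldl
              (fun m i => min m (PySem.List.pyGetD ps i (0, 0)).1) a,
            ((l.filter (fun q => q.2.lookup "group" == some gi)).map (·.1)).foldl
              (fun m i => min m (PySem.List.pyGetD ps i (0, 0)).2) b,
            ((l.filter (fun q => q.2.lookup "group" == some gi)).map (·.1)).foldl
              (fun m i => max m ((PySem.List.pyGetD ps i (0, 0)).1 + (PySem.List.pyGetD ss i (0, 0)).1)) c,
            ((l.filter (fun q => q.2.lookup "group" == some gi)).map (·.1)).foldl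
              (fun m i => max m ((PySem.List.pyGetD ps i (0, 0)).2 + (PySem.List.pyGetD ss i (0, 0)).2)) d) := by
  induction l generalizing a b c d with
  | nil => simp
  | cons q l ih =>
    by_cases h : (q.2.lookup "group" == some gi) = true <;>
      simp [cgbStep, h, ih]

theorem cgb_foldl_none (gi : Int) (ps ss : List (Int × Int)) (l : List (Int × List (String × Int))) :
    l.foldl (cgbStep gi ps ss) none =
      match (l.filter (fun q => q.2.lookup "group" == some gi)).map (·.1) with
      | [] => none
      | i :: cs =>
        some (cs.foldl (fun m j => min m (PySem.List.pyGetD ps j (0, 0)).1) ((PySem.List.pyGetD ps i (0, 0)).1),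
              cs.foldl (fun m j => min m (PySem.List.pyGetD ps j (0, 0)).2) ((PySem.List.pyGetD ps i (0, 0)).2),
              cs.foldl (fun m j => max m ((PySem.List.pyGetD ps j (0, 0)).1 + (PySem.List.pyGetD ss j (0, 0)).1)) ((PySem.List.pyGetD ps i (0, 0)).1 + (PySem.List.pyGetD ss i (0, 0)).1),
              cs.foldl (fun m j => max m ((PySem.List.pyGetD ps j (0, 0)).2 + (PySem.List.pyGetD ss j (0, 0)).2)) ((PySem.List.pyGetD ps i (0, 0)).2 + (PySem.List.pyGetD ss i (0, 0)).2)) := by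
  induction l with
  | nil => simp
  | cons q l ih =>
    by_cases h : (q.2.lookup "group" == some gi) = true
    · simp only [List.foldl_cons, List.filter_cons, h]
      simp only [cgbStep, h]
      exact cgb_foldl_some gi ps ss l _ _ _ _
    · have hs : cgbStep gi ps ss none q = none := by simp [cgbStep, h]
      simp only [List.foldl_cons, hs, List.filter_cons, h, Bool.false_eq_true, ite_false, ih]

-- ===== VERDICT (by name: the statement is the Claim_ definition above) =====
theorem compute_group_bounds_spec : Claim_equal_compute_group_bounds := by
  intro gi nodes ps ss pad lo _ _
  unfold Spec_compute_group_bounds compute_group_bounds compute_group_bounds_alt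
  rw [cgb_foldl_none]
  cases hch : ((PySem.List.enumerate nodes 0).filter (fun q => q.2.lookup "group" == some gi)).map (·.1) with
  | nil => simp
  | cons i cs =>
    simp only [List.isEmpty_cons, Bool.false_eq_true, ite_false, List.map_cons,
      PySem.List.min?_id_cons, PySem.List.max?_id_cons, Option.getD_some, List.foldl_map]
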